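-- pv_equiv track=rewrite | github.com/Salo7a/Music-Equalizer-and-Visualizer | subBands.py | subBands
-- ===== SOURCE A (Python) =====
-- def subBands(arr, subs):
--     subSize = int(len(arr)//subs)
--     arrSubs = []
--     for index in range(subs):
--         sub = []
--         if index == 0:
--             sub = arr[:subSize]
--         elif index == range(subs)[-1]:
--             sub = arr[subSize*index:]
--         else:
--             sub = arr[subSize*index:(subSize*(index+1))]
--
--         arrSubs.append(sub)
--
--     return arrSubs
-- ===== SOURCE B (Python) =====
-- def subBands(arr, subs):
--     subSize = len(arr) // subs
--     it = iter(arr)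
--     out = []
--     k = subs
--     while k > 1:
--         out.append([next(it) for _ in range(subSize)])
--         k -= 1
--     if k == 1:
--         out.append(list(it))
--     return out
-- ===== Notes on version B (the rewrite author's own statement) =====
-- stated objective: alternative
-- what changed: B replaces A's index-arithmetic loop (slice offsets subSize*index with first/middle/last branching) by a single forward consumption of an iterator: each of the first subs-1 bands is read off with subSize next() calls and the last band is whatever remains in the iterator, so no offsets or slices are computed at all.
import Mathlib
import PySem

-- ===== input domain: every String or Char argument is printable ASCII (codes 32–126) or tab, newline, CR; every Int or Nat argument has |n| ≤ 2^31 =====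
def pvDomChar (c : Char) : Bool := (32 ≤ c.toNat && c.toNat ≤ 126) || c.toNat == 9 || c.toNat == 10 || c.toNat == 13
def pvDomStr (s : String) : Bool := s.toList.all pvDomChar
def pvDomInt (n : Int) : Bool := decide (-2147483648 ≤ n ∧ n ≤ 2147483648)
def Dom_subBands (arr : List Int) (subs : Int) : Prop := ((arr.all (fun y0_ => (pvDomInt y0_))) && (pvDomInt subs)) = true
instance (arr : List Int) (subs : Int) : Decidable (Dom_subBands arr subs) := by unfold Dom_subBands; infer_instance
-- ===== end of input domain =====

-- B replaces A's index-arithmetic slicing loop by a single forward consumption of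
-- an iterator: each band is read off with next(), no slice offsets (objective: alternative).

-- ===== PORT A =====
def subBands (arr : List Int) (subs : Int) : List (List Int) :=
  let subSize : Int := PySem.Int.floordiv (arr.length : Int) subs
  (PySem.List.pyRange 0 subs 1).foldl (fun arrSubs index =>
    let sub : List Int :=
      if index = 0 then PySem.List.slice arr none (some subSize)
      else if some index = PySem.List.pyGet? (PySem.List.pyRange 0 subs 1) (-1) then
        PySem.List.slice arr (some (subSize * index)) none
      else
        PySem.List.slice arr (some (subSize * index)) (some (subSize * (index + 1)))
    arrSubs ++ [sub]) []

-- ===== PORT B =====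
-- [next(it) for _ in range(subSize)] consumes min(subSize, len) items of the iterator;
-- range of a negative subSize is empty, hence the .toNat clamp is exact here.
def subBandsLoop (subSize : Int) (out : List (List Int)) (it : List Int) (k : Int) : List (List Int) :=
  if _h0 : 1 < k then
    subBandsLoop subSize (out ++ [it.take subSize.toNat]) (it.drop subSize.toNat) (k - 1)
  else if k = 1 then out ++ [it]
  else out
termination_by k.toNat
decreasing_by omega

def subBands_alt (arr : List Int) (subs : Int) : List (List Int) :=
  let subSize : Int := PySem.Int.floordiv (arr.length : Int) subs
  subBandsLoop subSize [] arr subs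

-- ===== PRECONDITION & SPEC =====
-- Pre_ excludes exactly subs = 0, where Python A raises ZeroDivisionError.
def Pre_subBands (arr : List Int) (subs : Int) : Prop := subs ≠ 0
instance (arr : List Int) (subs : Int) : Decidable (Pre_subBands arr subs) := by unfold Pre_subBands; infer_instance
def pvWitness_subBands : List Int × Int := ([1, 2, 3, 4, 5], 2)

def Spec_subBands (arr : List Int) (subs : Int) (out : List (List Int)) : Prop := out = subBands_alt arr subs
instance (arr : List Int) (subs : Int) (out : List (List Int)) : Decidable (Spec_subBands arr subs out) := by unfold Spec_subBands; infer_instance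

-- ===== CLAIM (what is proved, stated in full; the proofs are below) =====
def Claim_equal_subBands : Prop := ∀ (arr : List Int) (subs : Int), Dom_subBands arr subs → Pre_subBands arr subs → Spec_subBands arr subs (subBands arr subs)

-- ===== LEMMAS AND PROOFS =====

-- Proof-side recursive form of B's loop body (the loop without its accumulator).
def subBandsGo (subSize : Int) (rest : List Int) (k : Int) : List (List Int) :=
  if _h0 : k ≤ 0 then []
  else if _h1 : k = 1 then [rest]
  else
    rest.take subSize.toNat :: subBandsGo subSize (rest.drop subSize.toNat) (k - 1)
termination_by k.toNat
decreasing_by omega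

-- The accumulator loop appends what the recursive form produces.
theorem subBandsLoop_eq_go (s : Int) (rest : List Int) (k : Int) :
    ∀ (out : List (List Int)), subBandsLoop s out rest k = out ++ subBandsGo s rest k := by
  induction rest, k using subBandsGo.induct (subSize := s) with
  | case1 rest k hk =>
    intro out
    rw [subBandsLoop, subBandsGo, dif_pos hk, dif_neg (by omega), if_neg (by omega)]
    simp
  | case2 rest hk =>
    intro out
    rw [subBandsLoop, subBandsGo]
    norm_num
  | case3 rest k hk hk1 ih =>
    intro out
    rw [subBandsLoop, subBandsGo, dif_neg hk, dif_neg hk1, dif_pos (by omega), ih]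
    simp

-- Common closed form for n ≥ 1 bands of width s: n-1 chunks then the remainder.
def refBands (arr : List Int) (n s : Nat) : List (List Int) :=
  (List.range (n - 1)).map (fun i => (arr.drop (i * s)).take s) ++ [arr.drop ((n - 1) * s)]

theorem subBands_last_idx (subs : Int) (h : 0 < subs) :
    PySem.List.pyGet? (PySem.List.pyRange 0 subs 1) (-1) = some (subs - 1) := by
  rw [PySem.List.pyGet?_neg_one]
  have hsplit := PySem.List.pyRange_one_succ_right (a := 0) (b := subs - 1) (by omega)
  have e : subs - 1 + 1 = subs := by omega
  rw [e] at hsplit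
  rw [hsplit]
  simp

theorem subBands_neg (arr : List Int) (subs : Int) (h : subs < 0) :
    subBands arr subs = subBands_alt arr subs := by
  simp only [subBands, subBands_alt]
  rw [PySem.List.pyRange_one_eq_nil (by omega : subs ≤ (0:Int))]
  rw [subBandsLoop, dif_neg (by omega), if_neg (by omega)]
  simp

theorem subBandsGo_eq_ref (s : Nat) :
    ∀ (n : Nat), 1 ≤ n → ∀ (arr : List Int),
      subBandsGo (s : Int) arr (n : Int) = refBands arr n s := by
  intro n
  induction n with
  | zero => omega
  | succ m ih =>
    intro _ arr
    by_cases hm : m = 0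
    · subst hm
      rw [subBandsGo]
      simp [refBands]
    · obtain ⟨p, rfl⟩ : ∃ p, m = p + 1 := ⟨m - 1, by omega⟩
      rw [subBandsGo]
      rw [dif_neg (by push_cast; omega), dif_neg (by push_cast; omega)]
      have e1 : (((p + 1 + 1 : Nat) : Int)) - 1 = ((p + 1 : Nat) : Int) := by push_cast; ring
      rw [e1]
      simp only [Int.toNat_natCast]
      rw [ih (by omega)]
      unfold refBands
      simp only [Nat.add_sub_cancel]
      rw [List.range_succ_eq_map]
      simp only [List.map_cons, List.map_map, List.cons_append, List.cons.injEq]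
      refine ⟨by simp, ?_⟩
      congr 1
      · rw [List.map_inj_left]
        intro i _
        simp only [Function.comp]
        rw [List.drop_drop]
        congr 1
        rw [Nat.succ_eq_add_one]
        ring_nf
      · rw [List.drop_drop]
        congr 1
        ring_nf

-- slice with a Nat chunk width equals the closed-form chunk.
theorem subBands_slice_chunk (arr : List Int) (s i : Nat) :
    PySem.List.slice arr (some ((s : Int) * (i : Int))) (some ((s : Int) * ((i : Int) + 1))) =
      (arr.drop (i * s)).take s := by
  have e1 : (s : Int) * (i : Int) = ((i * s : Nat) : Int) := by push_cast; ring
  have e2 : (s : Int) * ((i : Int) + 1) = ((i * s : Nat) : Int) + ((s : Nat) : Int) := by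
    push_cast; ring
  rw [e1, e2, PySem.List.slice_natCast_add]

-- A's loop computes the closed form too.
theorem subBands_pos (arr : List Int) (subs : Int) (h : 0 < subs) :
    subBands arr subs =
      refBands arr subs.toNat (PySem.Int.floordiv (arr.length : Int) subs).toNat := by
  unfold subBands
  dsimp only
  set ss : Int := PySem.Int.floordiv (arr.length : Int) subs with hss
  have hssnn : 0 ≤ ss := by
    rw [hss, PySem.Int.floordiv_eq_ediv_of_pos h]
    exact Int.ediv_nonneg (by positivity) (by omega)
  set s : Nat := ss.toNat with hs
  have hsse : ss = (s : Int) := by omega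
  set n : Nat := subs.toNat with hn
  have hsubs : subs = (n : Int) := by omega
  have hnpos : 0 < n := by omega
  rw [PySem.List.foldl_append_singleton_eq_map, List.nil_append]
  have hlenr : (PySem.List.pyRange 0 subs 1).length = n := by
    rw [PySem.List.length_pyRange_one]; omega
  apply List.ext_getElem
  · simp [refBands, hlenr]
    omega
  · intro k hk1 hk2
    have hkn : k < n := by simpa [hlenr] using hk1
    rw [List.getElem_map, PySem.List.getElem_pyRange_one]
    simp only [zero_add]
    by_cases hl : k + 1 < n
    · -- not the last band: refBands picks a chunk from the map part
      have href : (refBands arr n s)[k]'hk2 = (arr.drop (k * s)).take s := by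
        unfold refBands
        rw [List.getElem_append_left (by simp; omega)]
        simp
      rw [href]
      by_cases hk0 : k = 0
      · subst hk0
        rw [if_pos (by norm_num), hsse, PySem.List.slice_to_natCast]
        simp
      · rw [if_neg (by exact_mod_cast (Nat.cast_injective.ne hk0 : ((k:Int)) ≠ ((0:Nat):Int)))]
        rw [subBands_last_idx subs h]
        rw [if_neg (by intro hc; simp only [Option.some.injEq] at hc; omega)]
        rw [hsse, subBands_slice_chunk]
    · -- the last band: refBands picks the remainder
      have hkl : k + 1 = n := by omega
      have href : (refBands arr n s)[k]'hk2 = arr.drop ((n - 1) * s) := by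
        unfold refBands
        rw [List.getElem_append_right (by simp; omega)]
        simp
      rw [href]
      by_cases hk0 : k = 0
      · subst hk0
        have hs1 : subs = 1 := by omega
        rw [if_pos (by norm_num)]
        have hlen : ss = (arr.length : Int) := by
          rw [hss, hs1, PySem.Int.floordiv_eq_ediv_of_pos (by norm_num)]
          simp
        rw [hlen, PySem.List.slice_to_natCast]
        have hn1 : n - 1 = 0 := by omega
        simp [hn1]
      · rw [if_neg (by exact_mod_cast (Nat.cast_injective.ne hk0 : ((k:Int)) ≠ ((0:Nat):Int)))]
        rw [subBands_last_idx subs h]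
        rw [if_pos (by simp only [Option.some.injEq]; omega)]
        have e1 : ss * (k : Int) = ((k * s : Nat) : Int) := by rw [hsse]; push_cast; ring
        rw [e1, PySem.List.slice_from_natCast]
        have : k = n - 1 := by omega
        rw [this]

-- ===== VERDICT (by name: the statement is the Claim_ definition above) =====
theorem subBands_spec : Claim_equal_subBands := by
  intro arr subs _ hpre
  unfold Spec_subBands
  rcases lt_trichotomy subs 0 with h | h | h
  · exact subBands_neg arr subs h
  · exact absurd h hpre
  · -- positive: both equal the closed form
    obtain ⟨n, rfl⟩ : ∃ n : Nat, subs = (n : Int) := ⟨subs.toNat, by omega⟩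
    have hssnn : 0 ≤ PySem.Int.floordiv (arr.length : Int) (n : Int) := by
      rw [PySem.Int.floordiv_eq_ediv_of_pos h]
      exact Int.ediv_nonneg (by positivity) (by omega)
    obtain ⟨s, hs⟩ : ∃ s : Nat, PySem.Int.floordiv (arr.length : Int) (n : Int) = (s : Int) :=
      ⟨(PySem.Int.floordiv (arr.length : Int) (n : Int)).toNat, by omega⟩
    rw [subBands_pos arr _ h]
    unfold subBands_alt
    dsimp only
    rw [subBandsLoop_eq_go, List.nil_append, hs,
      subBandsGo_eq_ref s n (by exact_mod_cast h) arr]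
    simp
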